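-- pv_equiv track=rewrite | github.com/qkre/Problem-Solve | PJH/programmers/42840.py | solution
-- ===== SOURCE A (Python) =====
-- def solution(answers):
--     answer = []
--     corrects = []
--     supos = [[1, 2, 3, 4, 5], [2, 1, 2, 3, 2, 4, 2, 5], [3, 3, 1, 1, 2, 2, 4, 4, 5, 5]]
--
--     for supo in supos:
--         idx = 0
--         supo_idx = 0
--         correct = 0
--         while idx != len(answers):
--             if supo[supo_idx] == answers[idx]:
--                 correct += 1
--
--             idx += 1
--             supo_idx += 1
--             if supo_idx == len(supo):
--                 supo_idx = 0
--
--         corrects.append(correct)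
--
--     max_correct = max(corrects)
--
--     for i in range(3):
--         if corrects[i] == max_correct:
--             answer.append(i+1)
--
--     return answer
-- ===== SOURCE B (Python) =====
-- def solution(answers):
--     patterns = [[1, 2, 3, 4, 5], [2, 1, 2, 3, 2, 4, 2, 5], [3, 3, 1, 1, 2, 2, 4, 4, 5, 5]]
--     # Bucket the answers by residue class modulo 40 (= lcm of the pattern lengths):
--     # freq[(r, v)] = how many positions i with i % 40 == r carry the answer v.
--     # Each pattern's score is then a pure table aggregation over the 40 residues,
--     # with no per-answer pattern comparison.
--     freq = {}
--     for i, a in enumerate(answers):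
--         key = (i % 40, a)
--         freq[key] = freq.get(key, 0) + 1
--     scores = [sum(freq.get((r, p[r % len(p)]), 0) for r in range(40)) for p in patterns]
--     m = max(scores)
--     return [j + 1 for j in range(3) if scores[j] == m]
-- ===== Notes on version B (the rewrite author's own statement) =====
-- stated objective: faster
-- what changed: Replaces A's per-answer pattern comparison (three while-loop scans, each comparing every answer against a wrapping pattern cursor) by a counting algorithm: one pass builds a frequency table keyed by (position mod 40, answer value) -- 40 being the lcm of the three pattern lengths -- and each pattern's score is then obtained purely by 40 table lookups per pattern, without touching the answers again.
import Mathlib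
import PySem

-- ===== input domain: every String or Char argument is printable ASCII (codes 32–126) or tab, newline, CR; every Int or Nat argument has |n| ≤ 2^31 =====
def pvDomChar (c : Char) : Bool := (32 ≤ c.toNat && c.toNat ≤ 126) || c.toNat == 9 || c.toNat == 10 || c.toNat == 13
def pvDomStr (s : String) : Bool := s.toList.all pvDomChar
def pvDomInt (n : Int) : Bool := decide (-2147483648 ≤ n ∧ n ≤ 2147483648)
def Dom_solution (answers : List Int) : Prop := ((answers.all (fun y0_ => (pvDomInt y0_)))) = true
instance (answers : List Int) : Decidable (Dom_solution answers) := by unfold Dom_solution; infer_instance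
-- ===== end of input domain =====

-- B replaces A's three per-answer pattern scans by one counting pass building a frequency table
-- keyed by (i mod 40, answer), then 40 table lookups per pattern (objective: faster, measured).

-- ===== PORT A =====
-- A's while-loop over answers with a wrapping pattern cursor, as structural recursion on the answers
def pvCountA (supo : List Int) : List Int → Int → Int → Int
  | [], _, correct => correct
  | a :: rest, supo_idx, correct =>
      let correct' := if PySem.List.pyGetD supo supo_idx 0 = a then correct + 1 else correct
      let si := supo_idx + 1
      let si' := if si = (supo.length : Int) then 0 else si
      pvCountA supo rest si' correct'

def solution (answers : List Int) : List Int :=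
  let supos : List (List Int) := [[1,2,3,4,5],[2,1,2,3,2,4,2,5],[3,3,1,1,2,2,4,4,5,5]]
  let corrects := supos.foldl (fun acc supo => acc ++ [pvCountA supo answers 0 0]) []
  let maxCorrect := (PySem.List.max? corrects id).getD 0
  (PySem.List.pyRange 0 3 1).foldl
    (fun acc i => if PySem.List.pyGetD corrects i 0 = maxCorrect then acc ++ [i + 1] else acc) []

-- ===== PORT B =====
-- freq[(i % 40, a)] += 1, built by the for-loop over enumerate(answers)
def pvFreq (answers : List Int) : PySem.Dict (Int × Int) Int :=
  (PySem.List.enumerate answers 0).foldl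
    (fun d ia =>
      let key := (PySem.Int.mod ia.1 40, ia.2)
      d.insert key (d.getD key 0 + 1))
    PySem.Dict.empty

-- sum(freq.get((r, p[r % len(p)]), 0) for r in range(40))
def pvScoreB (freq : PySem.Dict (Int × Int) Int) (p : List Int) : Int :=
  (PySem.List.pyRange 0 40 1).foldl
    (fun acc r => acc + freq.getD (r, PySem.List.pyGetD p (PySem.Int.mod r (p.length : Int)) 0) 0) 0

def solution_alt (answers : List Int) : List Int :=
  let patterns : List (List Int) := [[1,2,3,4,5],[2,1,2,3,2,4,2,5],[3,3,1,1,2,2,4,4,5,5]]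
  let freq := pvFreq answers
  let scores := patterns.map (fun p => pvScoreB freq p)
  let m := (PySem.List.max? scores id).getD 0
  (PySem.List.pyRange 0 3 1).foldl
    (fun acc j => if PySem.List.pyGetD scores j 0 = m then acc ++ [j + 1] else acc) []

-- ===== PRECONDITION & SPEC =====
def Spec_solution (answers : List Int) (out : List Int) : Prop := out = solution_alt answers
instance (answers : List Int) (out : List Int) : Decidable (Spec_solution answers out) := by unfold Spec_solution; infer_instance

-- ===== CLAIM (what is proved, stated in full; the proofs are below) =====
def Claim_equal_solution : Prop := ∀ (answers : List Int), Dom_solution answers → Spec_solution answers (solution answers)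

-- ===== LEMMAS AND PROOFS =====

-- the common count: matches of answers (from position k) against pattern p of length L
def pvN (p : List Int) (L : Nat) (answers : List Int) (k : Nat) : Int :=
  ((PySem.List.enumerate answers (k : Int)).countP
    (fun ia => PySem.List.pyGetD p (PySem.Int.mod ia.1 (L : Int)) 0 == ia.2) : Int)

lemma pvWrap (L k : Nat) (hL : 0 < L) :
    (if ((k % L : Nat) : Int) + 1 = (L : Int) then (0 : Int) else ((k % L : Nat) : Int) + 1)
      = (((k + 1) % L : Nat) : Int) := by
  have hdm := Nat.div_add_mod k L
  split_ifs with h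
  · have h2 : k % L + 1 = L := by exact_mod_cast h
    have h3 : k + 1 = L * (k / L + 1) := by rw [Nat.mul_succ]; omega
    rw [h3, Nat.mul_mod_right]
    simp
  · have h2 : k % L + 1 ≠ L := by exact_mod_cast h
    have hlt : k % L < L := Nat.mod_lt _ hL
    have : (k + 1) % L = k % L + 1 := by
      have he : k + 1 = L * (k / L) + (k % L + 1) := by omega
      rw [he, Nat.mul_add_mod]
      exact Nat.mod_eq_of_lt (by omega)
    rw [this]
    push_cast; ring

lemma pvCountA_eq (p : List Int) (L : Nat) (hL : 0 < L) (hlen : p.length = L) :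
    ∀ (answers : List Int) (k : Nat) (c : Int),
      pvCountA p answers ((k % L : Nat) : Int) c = c + pvN p L answers k := by
  intro answers
  induction answers with
  | nil => intro k c; simp [pvCountA, pvN, PySem.List.enumerate]
  | cons a rest ih =>
    intro k c
    show pvCountA p (a :: rest) ((k % L : Nat) : Int) c = _
    rw [pvCountA]
    simp only [hlen]
    rw [pvWrap L k hL]
    rw [ih (k + 1)]
    have hmod : PySem.Int.mod (k : Int) (L : Int) = ((k % L : Nat) : Int) :=
      PySem.Int.mod_natCast k L
    have hN : pvN p L (a :: rest) k
        = (if PySem.List.pyGetD p ((k % L : Nat) : Int) 0 = a then 1 else 0)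
          + pvN p L rest (k + 1) := by
      unfold pvN
      rw [PySem.List.enumerate_cons, List.countP_cons]
      have hk1 : (k : Int) + 1 = ((k + 1 : Nat) : Int) := by push_cast; ring
      rw [hk1]
      simp only [hmod, beq_iff_eq]
      split_ifs <;> push_cast <;> ring
    rw [hN]
    split_ifs <;> ring

-- the indicator sum over the 40 residues picks out exactly r = r0
lemma pvSumInd (f : Int → Int) (r0 v : Int) (h1 : 0 ≤ r0) (h2 : r0 < 40) :
    ((PySem.List.pyRange 0 40 1).map
        (fun r => if r = r0 ∧ f r = v then (1 : Int) else 0)).sum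
      = if f r0 = v then 1 else 0 := by
  have hr : PySem.List.pyRange 0 40 1
      = [0,1,2,3,4,5,6,7,8,9,10,11,12,13,14,15,16,17,18,19,20,21,22,23,24,25,
         26,27,28,29,30,31,32,33,34,35,36,37,38,39] := by decide
  rw [hr]
  interval_cases r0 <;> simp

set_option maxHeartbeats 1000000 in
lemma pvScoreB_eq_N (p : List Int) (L : Nat) (hdvd : L ∣ 40) :
    ∀ (answers : List Int) (k : Nat),
      (PySem.List.pyRange 0 40 1).foldl
        (fun acc r => acc +
          (((PySem.List.enumerate answers (k : Int)).map
              (fun ia => (PySem.Int.mod ia.1 40, ia.2))).count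
            (r, PySem.List.pyGetD p (PySem.Int.mod r (L : Int)) 0) : Int)) 0
        = pvN p L answers k := by
  intro answers
  induction answers with
  | nil =>
    intro k
    simp [PySem.List.enumerate, pvN]
  | cons a rest ih =>
    intro k
    rw [PySem.List.enumerate_cons]
    have hk1 : (k : Int) + 1 = ((k + 1 : Nat) : Int) := by push_cast; ring
    rw [hk1]
    simp only [List.map_cons]
    have hcnt : ∀ r : Int,
        (((PySem.Int.mod (k : Int) 40, a) ::
            ((PySem.List.enumerate rest ((k + 1 : Nat) : Int)).map
              (fun ia => (PySem.Int.mod ia.1 40, ia.2)))).count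
          (r, PySem.List.pyGetD p (PySem.Int.mod r (L : Int)) 0) : Int)
        = (((PySem.List.enumerate rest ((k + 1 : Nat) : Int)).map
              (fun ia => (PySem.Int.mod ia.1 40, ia.2))).count
            (r, PySem.List.pyGetD p (PySem.Int.mod r (L : Int)) 0) : Int)
          + (if r = ((k % 40 : Nat) : Int)
                ∧ PySem.List.pyGetD p (PySem.Int.mod r (L : Int)) 0 = a then 1 else 0) := by
      intro r
      rw [List.count_cons]
      have hm : PySem.Int.mod (k : Int) 40 = ((k % 40 : Nat) : Int) :=
        PySem.Int.mod_natCast k 40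
      rw [hm]
      simp only [beq_iff_eq, Prod.mk.injEq]
      split_ifs with h h' h'
      · push_cast; ring
      · exact absurd ⟨h.1.symm, h.2.symm⟩ h'
      · exact absurd ⟨h'.1.symm, h'.2.symm⟩ h
      · push_cast; ring
    simp only [hcnt]
    rw [PySem.List.foldl_add]
    rw [PySem.List.sum_map_add_int]
    have hIH := ih (k + 1)
    rw [PySem.List.foldl_add] at hIH
    simp only [zero_add] at hIH ⊢
    rw [hIH]
    have h1 : (0 : Int) ≤ ((k % 40 : Nat) : Int) := Int.natCast_nonneg _
    have hlt : k % 40 < 40 := Nat.mod_lt k (by norm_num)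
    have h2 : ((k % 40 : Nat) : Int) < 40 := by exact_mod_cast hlt
    rw [pvSumInd (fun r => PySem.List.pyGetD p (PySem.Int.mod r (L : Int)) 0)
        (((k % 40 : Nat) : Int)) a h1 h2]
    have hmm : PySem.Int.mod (((k % 40 : Nat) : Int)) (L : Int) = ((k % L : Nat) : Int) := by
      have := PySem.Int.mod_natCast (k % 40) L
      rw [this, Nat.mod_mod_of_dvd k hdvd]
    have hmk : PySem.Int.mod (k : Int) (L : Int) = ((k % L : Nat) : Int) :=
      PySem.Int.mod_natCast k L
    rw [hmm]
    unfold pvN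
    rw [PySem.List.enumerate_cons, List.countP_cons, hk1]
    simp only [hmk, beq_iff_eq]
    split_ifs <;> push_cast <;> ring

lemma pvScoreB_eq (p : List Int) (L : Nat) (hL : 0 < L) (hdvd : L ∣ 40)
    (hlen : p.length = L) (answers : List Int) :
    pvScoreB (pvFreq answers) p = pvCountA p answers 0 0 := by
  have hA := pvCountA_eq p L hL hlen answers 0 0
  simp only [Nat.zero_mod, Nat.cast_zero, zero_add] at hA
  rw [hA]
  have hfreq : pvFreq answers
      = ((PySem.List.enumerate answers 0).map
            (fun ia => (PySem.Int.mod ia.1 40, ia.2))).foldl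
          (fun d x => d.insert x (d.getD x 0 + 1)) PySem.Dict.empty := by
    rw [List.foldl_map]; rfl
  unfold pvScoreB
  rw [hfreq]
  simp only [PySem.Dict.getD_foldl_insert_add_one, PySem.Dict.getD_empty, zero_add, hlen]
  exact pvScoreB_eq_N p L hdvd answers 0

-- ===== VERDICT (by name: the statement is the Claim_ definition above) =====
theorem solution_spec : Claim_equal_solution := by
  intro answers _
  unfold Spec_solution solution solution_alt
  simp only [List.foldl_cons, List.foldl_nil, List.nil_append, List.map_cons, List.map_nil]
  simp only [pvScoreB_eq [1,2,3,4,5] 5 (by norm_num) (by norm_num) (by rfl) answers,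
      pvScoreB_eq [2,1,2,3,2,4,2,5] 8 (by norm_num) (by norm_num) (by rfl) answers,
      pvScoreB_eq [3,3,1,1,2,2,4,4,5,5] 10 (by norm_num) (by norm_num) (by rfl) answers]
  rfl
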